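-- pv_equiv track=rewrite | github.com/F2X-Alejo-Repo/BOM_Finder | src/bom_workbench/infrastructure/providers/base.py | sanitize_error_text
-- ===== SOURCE A (Python) =====
-- SAFE_ERROR_MESSAGE = "Provider request failed."
--
-- def sanitize_error_text(message: str) -> str:
--     """Strip common secret-bearing patterns from diagnostic text."""
--
--     if not message:
--         return SAFE_ERROR_MESSAGE
--
--     redacted = message
--     for token in ("Bearer ", "bearer ", "sk-", "x-api-key", "api_key"):
--         if token in redacted:
--             redacted = redacted.replace(token, "[redacted]")
--
--     return redacted
-- ===== SOURCE B (Python) =====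
-- SAFE_ERROR_MESSAGE = "Provider request failed."
--
-- _SECRET_TOKENS = ("Bearer ", "bearer ", "sk-", "x-api-key", "api_key")
--
--
-- def sanitize_error_text(message: str) -> str:
--     """Strip common secret-bearing patterns from diagnostic text.
--
--     Single left-to-right pass: at each position try the tokens in order
--     (they never overlap and '[redacted]' contains no token, so this equals
--     the sequential global replaces)."""
--
--     if not message:
--         return SAFE_ERROR_MESSAGE
--
--     out = []
--     i = 0
--     n = len(message)
--     while i < n:
--         for tok in _SECRET_TOKENS:
--             if message.startswith(tok, i):
--                 out.append("[redacted]")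
--                 i += len(tok)
--                 break
--         else:
--             out.append(message[i])
--             i += 1
--     return "".join(out)
-- ===== Notes on version B (the rewrite author's own statement) =====
-- stated objective: alternative
-- what changed: Replaces the five sequential full-string .replace passes with one left-to-right scan that tries the tokens in order at each position (valid because the tokens never overlap and '[redacted]' contains no token).
import Mathlib
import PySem

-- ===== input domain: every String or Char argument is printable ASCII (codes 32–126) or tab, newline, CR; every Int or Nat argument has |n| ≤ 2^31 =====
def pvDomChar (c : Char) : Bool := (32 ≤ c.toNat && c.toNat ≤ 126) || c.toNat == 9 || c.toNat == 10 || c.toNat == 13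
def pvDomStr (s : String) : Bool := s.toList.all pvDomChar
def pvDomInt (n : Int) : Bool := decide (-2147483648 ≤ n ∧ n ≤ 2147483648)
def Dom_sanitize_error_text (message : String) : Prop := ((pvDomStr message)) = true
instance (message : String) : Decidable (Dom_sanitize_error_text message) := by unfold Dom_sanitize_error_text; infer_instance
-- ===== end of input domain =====

-- B replaces A's five sequential global .replace passes by one left-to-right scan trying the
-- tokens in order at each position (alternative decomposition, same cost; equal because the
-- tokens never overlap and "[redacted]" contains no token).

-- ===== PORT A =====
def SAFE_ERROR_MESSAGE : String := "Provider request failed."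

-- literal port of A: empty-guard, then a fold over the token tuple doing
-- `if token in redacted: redacted = redacted.replace(token, "[redacted]")`
def sanitize_error_text (message : String) : String :=
  if message == "" then SAFE_ERROR_MESSAGE
  else
    (["Bearer ", "bearer ", "sk-", "x-api-key", "api_key"] : List String).foldl
      (fun redacted token =>
        if PySem.Str.isIn token redacted then PySem.Str.replace redacted token "[redacted]" else redacted)
      message

-- ===== PORT B =====
-- hand port of Source B's single scan (exact, pure code-point operations): at each index try the
-- tokens in order (startswith), emit "[redacted]" and jump past the token on a match, otherwise
-- copy one char.
def scanB : List Char → List Char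
  | [] => []
  | c :: t =>
    if ("Bearer ".toList).isPrefixOf (c :: t) then "[redacted]".toList ++ scanB (t.drop 6)
    else if ("bearer ".toList).isPrefixOf (c :: t) then "[redacted]".toList ++ scanB (t.drop 6)
    else if ("sk-".toList).isPrefixOf (c :: t) then "[redacted]".toList ++ scanB (t.drop 2)
    else if ("x-api-key".toList).isPrefixOf (c :: t) then "[redacted]".toList ++ scanB (t.drop 8)
    else if ("api_key".toList).isPrefixOf (c :: t) then "[redacted]".toList ++ scanB (t.drop 6)
    else c :: scanB t
  termination_by l => l.length
  decreasing_by
    all_goals simp [List.length_drop]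

def sanitize_error_text_alt (message : String) : String :=
  if message == "" then SAFE_ERROR_MESSAGE
  else String.ofList (scanB message.toList)

-- ===== PRECONDITION & SPEC =====
def Spec_sanitize_error_text (message : String) (out : String) : Prop := out = sanitize_error_text_alt message
instance (message : String) (out : String) : Decidable (Spec_sanitize_error_text message out) := by unfold Spec_sanitize_error_text; infer_instance

-- ===== CLAIM (what is proved, stated in full; the proofs are below) =====
def Claim_equal_sanitize_error_text : Prop := ∀ (message : String), Dom_sanitize_error_text message → Spec_sanitize_error_text message (sanitize_error_text message)

-- ===== LEMMAS AND PROOFS =====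

-- clean recursive form of Python's r.replace(old, new) for old ≠ [] (leftmost, non-overlapping)
def rep (old new : List Char) : List Char → List Char
  | [] => []
  | c :: t =>
    if old.isPrefixOf (c :: t) then new ++ rep old new (t.drop (old.length - 1))
    else c :: rep old new t
  termination_by l => l.length
  decreasing_by
    all_goals simp [List.length_drop]

theorem rep_nil (old new : List Char) : rep old new [] = [] := by simp [rep]

theorem rep_cons_pos (old new : List Char) (c : Char) (t : List Char)
    (h : old <+: (c :: t)) (hold : old ≠ []) :
    rep old new (c :: t) = new ++ rep old new ((c :: t).drop old.length) := by
  rcases List.exists_cons_of_ne_nil hold with ⟨o, os, rfl⟩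
  rw [rep, if_pos (by simpa [List.isPrefixOf_iff_prefix] using h)]
  simp

theorem rep_cons_neg (old new : List Char) (c : Char) (t : List Char)
    (h : ¬ old <+: (c :: t)) :
    rep old new (c :: t) = c :: rep old new t := by
  rw [rep, if_neg (by simpa [List.isPrefixOf_iff_prefix] using h)]

-- Chars.replace.go agrees with rep
theorem go_eq_rep (old new : List Char) (hold : old ≠ []) :
    ∀ fuel l acc, l.length ≤ fuel →
      PySem.Chars.replace.go old new fuel l acc = acc.reverse ++ rep old new l := by
  intro fuel
  induction fuel with
  | zero =>
    intro l acc hl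
    have : l = [] := by
      cases l with
      | nil => rfl
      | cons c t => simp at hl
    subst this; simp [PySem.Chars.replace.go, rep_nil]
  | succ n ih =>
    intro l acc hl
    cases l with
    | nil => simp [PySem.Chars.replace.go, rep_nil]
    | cons c t =>
      rw [PySem.Chars.replace.go]
      by_cases h : old.isPrefixOf (c :: t)
      · rw [if_pos h]
        have hpre : old <+: (c :: t) := List.isPrefixOf_iff_prefix.mp h
        rw [rep_cons_pos old new c t hpre hold]
        rw [ih _ _ (by
          rcases List.exists_cons_of_ne_nil hold with ⟨o, os, rfl⟩
          simp only [List.length_cons, List.length_drop] at hl ⊢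
          omega)]
        simp
      · rw [if_neg h]
        rw [rep_cons_neg old new c t (fun hp => h (List.isPrefixOf_iff_prefix.mpr hp))]
        rw [ih _ _ (by simp only [List.length_cons] at hl; omega)]
        simp

theorem replace_eq_rep (s old new : List Char) (hold : old ≠ []) :
    PySem.Chars.replace s old new = rep old new s := by
  rw [PySem.Chars.replace, if_neg (by simpa [List.isEmpty_iff] using hold)]
  simpa using go_eq_rep old new hold s.length s [] le_rfl

-- a prefix of an append is comparable with the left part
theorem prefix_append_cases {a p x : List Char} (h : a <+: p ++ x) : a <+: p ∨ p <+: a := by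
  rcases Nat.le_total a.length p.length with hl | hl
  · exact Or.inl ((List.isPrefix_append_of_length hl).mp h)
  · have hp : p <+: p ++ x := List.prefix_append p x
    rcases List.prefix_or_prefix_of_prefix h hp with h1 | h1
    · exact Or.inl h1
    · exact Or.inr h1

-- if a token occurs nowhere in r, rep is the identity
theorem rep_of_not_infix (old new r : List Char) (h : ¬ old <:+: r) : rep old new r = r := by
  induction r with
  | nil => exact rep_nil _ _
  | cons c t ih =>
    rw [List.infix_cons_iff, not_or] at h
    rw [rep_cons_neg old new c t h.1, ih h.2]

-- no match of `old` can start inside `p` (positional check, independent of what follows p)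
def noOverlap (old p : List Char) : Bool :=
  (List.range p.length).all
    (fun i => !(List.isPrefixOf old (p.drop i)) && !(List.isPrefixOf (p.drop i) old))

-- rep passes over a prefix in which no match can start
theorem rep_skip (old new : List Char) (_hold : old ≠ []) :
    ∀ p x, noOverlap old p = true → rep old new (p ++ x) = p ++ rep old new x := by
  intro p
  induction p with
  | nil => intro x _; simp
  | cons d p' ih =>
    intro x hno
    simp only [noOverlap, List.all_eq_true, List.mem_range] at hno
    have hb := hno 0 (by simp)
    simp only [List.drop_zero, Bool.and_eq_true, Bool.not_eq_true'] at hb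
    have h0 : ¬ old <+: (d :: p') ∧ ¬ (d :: p') <+: old := by
      constructor
      · intro h; rw [List.isPrefixOf_iff_prefix.mpr h] at hb; exact absurd hb.1 (by simp)
      · intro h; rw [List.isPrefixOf_iff_prefix.mpr h] at hb; exact absurd hb.2 (by simp)
    have hnp : ¬ old <+: (d :: p') ++ x := by
      intro h
      rcases prefix_append_cases h with h | h
      · exact h0.1 h
      · exact h0.2 h
    rw [List.cons_append, rep_cons_neg old new d (p' ++ x) (by simpa using hnp)]
    rw [ih x (by
      simp only [noOverlap, List.all_eq_true, List.mem_range]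
      intro i hi
      have := hno (i + 1) (by simp only [List.length_cons]; omega)
      simpa using this)]
    simp

-- rep through a known matched prefix / over the token itself
theorem rep_skip' (old new p s : List Char) (hold : old ≠ [])
    (hno : noOverlap old p = true) (hp : p <+: s) :
    rep old new s = p ++ rep old new (s.drop p.length) := by
  rcases hp with ⟨u, rfl⟩
  rw [rep_skip old new hold p u hno]
  simp

theorem rep_pos' (old new s : List Char) (hold : old ≠ []) (hp : old <+: s) :
    rep old new s = new ++ rep old new (s.drop old.length) := by
  rcases List.exists_cons_of_ne_nil (List.ne_nil_of_length_pos
    (lt_of_lt_of_le (List.length_pos_of_ne_nil hold) hp.length_le)) with ⟨c, t, rfl⟩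
  exact rep_cons_pos old new c t hp hold

-- rep never creates a token occurrence at the front: tokens contain no '[' while every
-- replacement block starts with '['
theorem rep_no_create (old t' : List Char) (hold : old ≠ []) (hlb : ('[' : Char) ∉ t') :
    ∀ n v p, v.length ≤ n → t' <+: p ++ rep old ("[redacted]".toList) v → t' <+: p ++ v := by
  intro n
  induction n with
  | zero =>
    intro v p hv h
    have : v = [] := by cases v with | nil => rfl | cons c t => simp at hv
    subst this; simpa [rep_nil] using h
  | succ m ih =>
    intro v p hv h
    cases v with
    | nil => simpa [rep_nil] using h
    | cons c t =>
      by_cases hpre : old <+: (c :: t)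
      · rw [rep_cons_pos old _ c t hpre hold] at h
        rcases Nat.le_total t'.length p.length with hl | hl
        · have : t' <+: p := by
            rcases prefix_append_cases h with h1 | h1
            · exact h1
            · exact (List.IsPrefix.eq_of_length_le h1 hl) ▸ List.prefix_refl p
          exact this.trans (List.prefix_append p _)
        · have hpt : p <+: t' := by
            rcases prefix_append_cases h with h1 | h1
            · have heq : t' = p := List.IsPrefix.eq_of_length_le h1 (le_antisymm h1.length_le hl ▸ le_rfl)
              exact heq ▸ List.prefix_refl p
            · exact h1
          rcases hpt with ⟨q, rfl⟩
          have hq : q <+: "[redacted]".toList ++ rep old ("[redacted]".toList) ((c :: t).drop old.length) :=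
            (List.prefix_append_right_inj p).mp h
          cases q with
          | nil => simp only [List.append_nil]; exact List.prefix_append p (c :: t)
          | cons d q' =>
            exfalso
            have : ('[' : Char) ∈ p ++ d :: q' := by
              rcases prefix_append_cases hq with h2 | h2
              · have hd : d = '[' := by
                  rcases h2 with ⟨r, hr⟩
                  have := congrArg (fun l => l.head?) hr
                  simpa using this
                subst hd; simp
              · have : ('[' : Char) ∈ d :: q' := h2.mem (by decide)
                simp [this]
            exact absurd this hlb
      · rw [rep_cons_neg old _ c t hpre] at h
        have h' : t' <+: (p ++ [c]) ++ rep old ("[redacted]".toList) t := by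
          simpa using h
        have hlen : t.length + 1 ≤ m + 1 := by simpa using hv
        have := ih t (p ++ [c]) (by omega) h'
        simpa using this

-- the chained A-side computation, on lists of chars
def chainRep (s : List Char) : List Char :=
  rep ("api_key".toList) ("[redacted]".toList)
    (rep ("x-api-key".toList) ("[redacted]".toList)
      (rep ("sk-".toList) ("[redacted]".toList)
        (rep ("bearer ".toList) ("[redacted]".toList)
          (rep ("Bearer ".toList) ("[redacted]".toList) s))))

theorem scanB_nil : scanB [] = [] := by simp [scanB]

-- main: the chain of five reps equals the single scan
theorem chain_eq_scan : ∀ n s, s.length ≤ n → chainRep s = scanB s := by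
  intro n
  induction n with
  | zero =>
    intro s hs
    have : s = [] := by cases s with | nil => rfl | cons c t => simp at hs
    subst this
    simp [chainRep, rep_nil, scanB_nil]
  | succ m ih =>
    intro s hs
    cases s with
    | nil => simp [chainRep, rep_nil, scanB_nil]
    | cons c t =>
      simp only [List.length_cons] at hs
      by_cases h1 : ("Bearer ".toList) <+: (c :: t)
      · have hA : chainRep (c :: t) = "[redacted]".toList ++ chainRep (t.drop 6) := by
          rw [chainRep, chainRep,
            rep_pos' _ _ _ (by decide) h1,
            rep_skip ("bearer ".toList) _ (by decide) _ _ (by decide),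
            rep_skip ("sk-".toList) _ (by decide) _ _ (by decide),
            rep_skip ("x-api-key".toList) _ (by decide) _ _ (by decide),
            rep_skip ("api_key".toList) _ (by decide) _ _ (by decide)]
          simp
        rw [hA, scanB, if_pos (List.isPrefixOf_iff_prefix.mpr h1),
          ih (t.drop 6) (by simp only [List.length_drop]; omega)]
      · by_cases h2 : ("bearer ".toList) <+: (c :: t)
        · have hA : chainRep (c :: t) = "[redacted]".toList ++ chainRep (t.drop 6) := by
            rw [chainRep, chainRep,
              rep_skip' ("Bearer ".toList) _ ("bearer ".toList) _ (by decide) (by decide) h2,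
              rep_pos' ("bearer ".toList) _ _ (by decide) (List.prefix_append _ _),
              rep_skip ("sk-".toList) _ (by decide) _ _ (by decide),
              rep_skip ("x-api-key".toList) _ (by decide) _ _ (by decide),
              rep_skip ("api_key".toList) _ (by decide) _ _ (by decide)]
            simp
          rw [hA, scanB, if_neg (fun hb => h1 (List.isPrefixOf_iff_prefix.mp hb)),
            if_pos (List.isPrefixOf_iff_prefix.mpr h2),
            ih (t.drop 6) (by simp only [List.length_drop]; omega)]
        · by_cases h3 : ("sk-".toList) <+: (c :: t)
          · have hA : chainRep (c :: t) = "[redacted]".toList ++ chainRep (t.drop 2) := by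
              rw [chainRep, chainRep,
                rep_skip' ("Bearer ".toList) _ ("sk-".toList) _ (by decide) (by decide) h3,
                rep_skip ("bearer ".toList) _ (by decide) _ _ (by decide),
                rep_pos' ("sk-".toList) _ _ (by decide) (List.prefix_append _ _),
                rep_skip ("x-api-key".toList) _ (by decide) _ _ (by decide),
                rep_skip ("api_key".toList) _ (by decide) _ _ (by decide)]
              simp
            rw [hA, scanB, if_neg (fun hb => h1 (List.isPrefixOf_iff_prefix.mp hb)),
              if_neg (fun hb => h2 (List.isPrefixOf_iff_prefix.mp hb)),
              if_pos (List.isPrefixOf_iff_prefix.mpr h3),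
              ih (t.drop 2) (by simp only [List.length_drop]; omega)]
          · by_cases h4 : ("x-api-key".toList) <+: (c :: t)
            · have hA : chainRep (c :: t) = "[redacted]".toList ++ chainRep (t.drop 8) := by
                rw [chainRep, chainRep,
                  rep_skip' ("Bearer ".toList) _ ("x-api-key".toList) _ (by decide) (by decide) h4,
                  rep_skip ("bearer ".toList) _ (by decide) _ _ (by decide),
                  rep_skip ("sk-".toList) _ (by decide) _ _ (by decide),
                  rep_pos' ("x-api-key".toList) _ _ (by decide) (List.prefix_append _ _),
                  rep_skip ("api_key".toList) _ (by decide) _ _ (by decide)]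
                simp
              rw [hA, scanB, if_neg (fun hb => h1 (List.isPrefixOf_iff_prefix.mp hb)),
                if_neg (fun hb => h2 (List.isPrefixOf_iff_prefix.mp hb)),
                if_neg (fun hb => h3 (List.isPrefixOf_iff_prefix.mp hb)),
                if_pos (List.isPrefixOf_iff_prefix.mpr h4),
                ih (t.drop 8) (by simp only [List.length_drop]; omega)]
            · by_cases h5 : ("api_key".toList) <+: (c :: t)
              · have hA : chainRep (c :: t) = "[redacted]".toList ++ chainRep (t.drop 6) := by
                  rw [chainRep, chainRep,
                    rep_skip' ("Bearer ".toList) _ ("api_key".toList) _ (by decide) (by decide) h5,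
                    rep_skip ("bearer ".toList) _ (by decide) _ _ (by decide),
                    rep_skip ("sk-".toList) _ (by decide) _ _ (by decide),
                    rep_skip ("x-api-key".toList) _ (by decide) _ _ (by decide),
                    rep_pos' ("api_key".toList) _ _ (by decide) (List.prefix_append _ _)]
                  simp
                rw [hA, scanB, if_neg (fun hb => h1 (List.isPrefixOf_iff_prefix.mp hb)),
                  if_neg (fun hb => h2 (List.isPrefixOf_iff_prefix.mp hb)),
                  if_neg (fun hb => h3 (List.isPrefixOf_iff_prefix.mp hb)),
                  if_neg (fun hb => h4 (List.isPrefixOf_iff_prefix.mp hb)),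
                  if_pos (List.isPrefixOf_iff_prefix.mpr h5),
                  ih (t.drop 6) (by simp only [List.length_drop]; omega)]
              · -- no token matches at this position: one character is copied
                have nc := fun (old t' : List Char) hold hlb v p h =>
                  rep_no_create old t' hold hlb (List.length v) v p le_rfl h
                have k2 : ¬ ("bearer ".toList) <+: c :: rep ("Bearer ".toList) ("[redacted]".toList) t := by
                  intro h
                  exact h2 (by simpa using nc ("Bearer ".toList) ("bearer ".toList) (by decide) (by decide) t [c] (by simpa using h))
                have k3 : ¬ ("sk-".toList) <+: c :: rep ("bearer ".toList) ("[redacted]".toList) (rep ("Bearer ".toList) ("[redacted]".toList) t) := by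
                  intro h
                  have s1 := nc ("bearer ".toList) ("sk-".toList) (by decide) (by decide) _ [c] (by simpa using h)
                  have s2 := nc ("Bearer ".toList) ("sk-".toList) (by decide) (by decide) t [c] s1
                  exact h3 (by simpa using s2)
                have k4 : ¬ ("x-api-key".toList) <+: c :: rep ("sk-".toList) ("[redacted]".toList) (rep ("bearer ".toList) ("[redacted]".toList) (rep ("Bearer ".toList) ("[redacted]".toList) t)) := by
                  intro h
                  have s1 := nc ("sk-".toList) ("x-api-key".toList) (by decide) (by decide) _ [c] (by simpa using h)
                  have s2 := nc ("bearer ".toList) ("x-api-key".toList) (by decide) (by decide) _ [c] s1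
                  have s3 := nc ("Bearer ".toList) ("x-api-key".toList) (by decide) (by decide) t [c] s2
                  exact h4 (by simpa using s3)
                have k5 : ¬ ("api_key".toList) <+: c :: rep ("x-api-key".toList) ("[redacted]".toList) (rep ("sk-".toList) ("[redacted]".toList) (rep ("bearer ".toList) ("[redacted]".toList) (rep ("Bearer ".toList) ("[redacted]".toList) t))) := by
                  intro h
                  have s1 := nc ("x-api-key".toList) ("api_key".toList) (by decide) (by decide) _ [c] (by simpa using h)
                  have s2 := nc ("sk-".toList) ("api_key".toList) (by decide) (by decide) _ [c] s1
                  have s3 := nc ("bearer ".toList) ("api_key".toList) (by decide) (by decide) _ [c] s2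
                  have s4 := nc ("Bearer ".toList) ("api_key".toList) (by decide) (by decide) t [c] s3
                  exact h5 (by simpa using s4)
                have hA : chainRep (c :: t) = c :: chainRep t := by
                  rw [chainRep, chainRep,
                    rep_cons_neg ("Bearer ".toList) _ c t h1,
                    rep_cons_neg ("bearer ".toList) _ c _ k2,
                    rep_cons_neg ("sk-".toList) _ c _ k3,
                    rep_cons_neg ("x-api-key".toList) _ c _ k4,
                    rep_cons_neg ("api_key".toList) _ c _ k5]
                rw [hA, scanB, if_neg (fun hb => h1 (List.isPrefixOf_iff_prefix.mp hb)),
                  if_neg (fun hb => h2 (List.isPrefixOf_iff_prefix.mp hb)),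
                  if_neg (fun hb => h3 (List.isPrefixOf_iff_prefix.mp hb)),
                  if_neg (fun hb => h4 (List.isPrefixOf_iff_prefix.mp hb)),
                  if_neg (fun hb => h5 (List.isPrefixOf_iff_prefix.mp hb)),
                  ih t (by omega)]

theorem chain_eq_scan' (s : List Char) : chainRep s = scanB s :=
  chain_eq_scan s.length s le_rfl

-- one pass of A's loop body, seen on char lists
theorem stepA_toList (r tok : String) (hold : tok.toList ≠ []) :
    (if PySem.Str.isIn tok r then PySem.Str.replace r tok "[redacted]" else r).toList
      = rep tok.toList ("[redacted]".toList) r.toList := by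
  by_cases h : PySem.Str.isIn tok r = true
  · rw [if_pos h, PySem.Str.toList_replace, replace_eq_rep _ _ _ hold]
  · rw [if_neg h,
      rep_of_not_infix _ _ _ (fun hin => h (by
        rw [PySem.Str.isIn_eq]
        exact (PySem.Chars.isIn_iff_infix _ _).mpr hin))]

-- ===== VERDICT (by name: the statement is the Claim_ definition above) =====
theorem sanitize_error_text_spec : Claim_equal_sanitize_error_text := by
  intro m _
  unfold Spec_sanitize_error_text sanitize_error_text sanitize_error_text_alt
  by_cases hm : m = ""
  · subst hm; rfl
  · rw [if_neg (fun hb => hm (by simpa using hb)), if_neg (fun hb => hm (by simpa using hb))]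
    simp only [List.foldl]
    apply String.toList_inj.mp
    rw [stepA_toList _ "api_key" (by decide),
      stepA_toList _ "x-api-key" (by decide),
      stepA_toList _ "sk-" (by decide),
      stepA_toList _ "bearer " (by decide),
      stepA_toList _ "Bearer " (by decide)]
    show chainRep m.toList = (String.ofList (scanB m.toList)).toList
    rw [String.toList_ofList]
    exact chain_eq_scan' m.toList
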